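-- pv_equiv track=rewrite | github.com/mahmood726-cyber/mes | mes_core/assess/rob_scorer.py | score_robins_i_overall
-- ===== SOURCE A (Python) =====
-- ROBINS_I_DOMAINS = [
--     "confounding", "selection_participants", "classification_interventions",
--     "deviations", "missing_data", "measurement", "selection_reported_result",
-- ]
--
-- _ROBINS_SEVERITY = {"low": 0, "moderate": 1, "serious": 2, "critical": 3}
--
-- def score_robins_i_overall(domains: dict[str, str]) -> str:
--     severities = [_ROBINS_SEVERITY.get(domains.get(d, "low"), 0) for d in ROBINS_I_DOMAINS]
--     worst = max(severities)
--     if worst >= 2: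
--         return "high"
--     if worst == 1:
--         return "some_concerns"
--     return "low"
-- ===== SOURCE B (Python) =====
-- ROBINS_I_DOMAINS = [
--     "confounding", "selection_participants", "classification_interventions",
--     "deviations", "missing_data", "measurement", "selection_reported_result",
-- ]
--
-- def score_robins_i_overall(domains: dict[str, str]) -> str:
--     if any(domains.get(d) in {"serious", "critical"} for d in ROBINS_I_DOMAINS):
--         return "high"
--     if any(domains.get(d) == "moderate" for d in ROBINS_I_DOMAINS):
--         return "some_concerns"
--     return "low"
-- ===== Notes on version B (the rewrite author's own statement) =====
-- stated objective: simpler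
-- what changed: B drops the numeric severity table and the max over a mapped list; it short-circuits by scanning the fixed domains for a serious/critical value, then for a moderate one, returning the tier directly.
import Mathlib
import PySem

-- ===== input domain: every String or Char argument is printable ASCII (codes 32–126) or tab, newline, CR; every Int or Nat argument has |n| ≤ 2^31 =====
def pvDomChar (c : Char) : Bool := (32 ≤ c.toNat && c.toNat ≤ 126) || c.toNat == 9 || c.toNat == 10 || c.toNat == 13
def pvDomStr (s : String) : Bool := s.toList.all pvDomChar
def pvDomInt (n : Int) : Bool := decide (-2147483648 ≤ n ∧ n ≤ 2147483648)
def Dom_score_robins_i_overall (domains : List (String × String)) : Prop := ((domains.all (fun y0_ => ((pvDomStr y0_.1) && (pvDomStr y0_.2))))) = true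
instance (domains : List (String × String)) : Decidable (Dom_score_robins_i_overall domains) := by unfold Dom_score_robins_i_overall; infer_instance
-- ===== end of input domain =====

-- B replaces the numeric severity table + max with direct short-circuit tier scans (objective: simpler).

-- ===== PORT A =====
def ROBINS_I_DOMAINS : List String :=
  ["confounding", "selection_participants", "classification_interventions",
   "deviations", "missing_data", "measurement", "selection_reported_result"]

def ROBINS_SEVERITY : PySem.Dict String Int :=
  PySem.Dict.ofList [("low", 0), ("moderate", 1), ("serious", 2), ("critical", 3)]

def score_robins_i_overall (domains : List (String × String)) : String :=
  let d := PySem.Dict.ofList domains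
  let severities := ROBINS_I_DOMAINS.map (fun k => ROBINS_SEVERITY.getD (d.getD k "low") 0)
  -- max(severities): the list is nonempty (7 literals), so max? is some; .getD 0 is exact here
  let worst := (PySem.List.max? severities (fun x => x)).getD 0
  if 2 ≤ worst then "high"
  else if worst = 1 then "some_concerns"
  else "low"

-- ===== PORT B =====
def score_robins_i_overall_alt (domains : List (String × String)) : String :=
  let d := PySem.Dict.ofList domains
  if ROBINS_I_DOMAINS.any (fun k => d.get? k == some "serious" || d.get? k == some "critical") then
    "high"
  else if ROBINS_I_DOMAINS.any (fun k => d.get? k == some "moderate") then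
    "some_concerns"
  else "low"

-- ===== PRECONDITION & SPEC =====
def Spec_score_robins_i_overall (domains : List (String × String)) (out : String) : Prop := out = score_robins_i_overall_alt domains
instance (domains : List (String × String)) (out : String) : Decidable (Spec_score_robins_i_overall domains out) := by unfold Spec_score_robins_i_overall; infer_instance

-- ===== CLAIM (what is proved, stated in full; the proofs are below) =====
def Claim_equal_score_robins_i_overall : Prop := ∀ (domains : List (String × String)), Dom_score_robins_i_overall domains → Spec_score_robins_i_overall domains (score_robins_i_overall domains)

-- ===== LEMMAS AND PROOFS =====

-- severity, as A computes it, of one looked-up (optional) value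
def sevO (o : Option String) : Int := ROBINS_SEVERITY.getD (o.getD "low") 0

theorem ROBINS_SEVERITY_eq_mk :
    ROBINS_SEVERITY = PySem.Dict.mk [("low", 0), ("moderate", 1), ("serious", 2), ("critical", 3)] := by
  decide

theorem sevO_ge2_iff (o : Option String) :
    2 ≤ sevO o ↔ (o = some "serious" ∨ o = some "critical") := by
  cases o with
  | none => simp [sevO, ROBINS_SEVERITY_eq_mk, PySem.Dict.getD, PySem.Dict.get?_mk_cons]
  | some s =>
    simp only [sevO, Option.getD_some, ROBINS_SEVERITY_eq_mk, PySem.Dict.getD,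
      PySem.Dict.get?_mk_cons, Option.some.injEq]
    by_cases h1 : s = "serious" <;> by_cases h2 : s = "critical" <;>
      by_cases h3 : s = "low" <;> by_cases h4 : s = "moderate" <;>
      simp_all [PySem.Dict.get?] <;> (try split_ifs <;> simp_all)
theorem sevO_ge1_iff (o : Option String) :
    1 ≤ sevO o ↔ (o = some "serious" ∨ o = some "critical" ∨ o = some "moderate") := by
  cases o with
  | none => simp [sevO, ROBINS_SEVERITY_eq_mk, PySem.Dict.getD, PySem.Dict.get?_mk_cons]
  | some s =>
    simp only [sevO, Option.getD_some, ROBINS_SEVERITY_eq_mk, PySem.Dict.getD,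
      PySem.Dict.get?_mk_cons, Option.some.injEq]
    by_cases h1 : s = "serious" <;> by_cases h2 : s = "critical" <;>
      by_cases h3 : s = "low" <;> by_cases h4 : s = "moderate" <;>
      simp_all [PySem.Dict.get?] <;> (try split_ifs <;> simp_all)

theorem foldl_max_ge_iff (c x : Int) (vs : List Int) :
    c ≤ vs.foldl max x ↔ c ≤ x ∨ ∃ v ∈ vs, c ≤ v := by
  induction vs generalizing x with
  | nil => simp
  | cons v t ih =>
    simp only [List.foldl_cons, ih, le_max_iff, List.mem_cons]
    constructor
    · rintro ((h | h) | ⟨w, hw, hc⟩)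
      · exact Or.inl h
      · exact Or.inr ⟨v, Or.inl rfl, h⟩
      · exact Or.inr ⟨w, Or.inr hw, hc⟩
    · rintro (h | ⟨w, (rfl | hw), hc⟩)
      · exact Or.inl (Or.inl h)
      · exact Or.inl (Or.inr hc)
      · exact Or.inr ⟨w, hw, hc⟩

-- the whole computation, for an arbitrary nonempty list of looked-up values
theorem main_gen (o : Option String) (os : List (Option String)) :
    (let worst := (os.map sevO).foldl max (sevO o)
     if 2 ≤ worst then "high" else if worst = 1 then "some_concerns" else "low")
    = (if (o :: os).any (fun x => x == some "serious" || x == some "critical") then "high"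
       else if (o :: os).any (fun x => x == some "moderate") then "some_concerns" else "low") := by
  simp only [List.any_cons, List.any_eq_true, Bool.or_eq_true, beq_iff_eq]
  set worst := (os.map sevO).foldl max (sevO o) with hw
  have h2 : 2 ≤ worst ↔ ((o = some "serious" ∨ o = some "critical") ∨
      ∃ x ∈ os, x = some "serious" ∨ x = some "critical") := by
    rw [hw, foldl_max_ge_iff]
    simp only [List.mem_map, sevO_ge2_iff]
    constructor
    · rintro (h | ⟨v, ⟨x, hx, rfl⟩, hc⟩)
      · exact Or.inl h
      · exact Or.inr ⟨x, hx, (sevO_ge2_iff x).mp hc⟩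
    · rintro (h | ⟨x, hx, hc⟩)
      · exact Or.inl h
      · exact Or.inr ⟨sevO x, ⟨x, hx, rfl⟩, (sevO_ge2_iff x).mpr hc⟩
  have h1 : 1 ≤ worst ↔ ((o = some "serious" ∨ o = some "critical" ∨ o = some "moderate") ∨
      ∃ x ∈ os, x = some "serious" ∨ x = some "critical" ∨ x = some "moderate") := by
    rw [hw, foldl_max_ge_iff]
    simp only [List.mem_map, sevO_ge1_iff]
    constructor
    · rintro (h | ⟨v, ⟨x, hx, rfl⟩, hc⟩)
      · exact Or.inl h
      · exact Or.inr ⟨x, hx, (sevO_ge1_iff x).mp hc⟩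
    · rintro (h | ⟨x, hx, hc⟩)
      · exact Or.inl h
      · exact Or.inr ⟨sevO x, ⟨x, hx, rfl⟩, (sevO_ge1_iff x).mpr hc⟩
  by_cases hhi : (o = some "serious" ∨ o = some "critical") ∨
      ∃ x ∈ os, x = some "serious" ∨ x = some "critical"
  · rw [if_pos (h2.mpr hhi), if_pos hhi]
  · rw [if_neg (fun h => hhi (h2.mp h)), if_neg hhi]
    by_cases hmo : o = some "moderate" ∨ ∃ x ∈ os, x = some "moderate"
    · have hge1 : 1 ≤ worst := by
        apply h1.mpr
        rcases hmo with h | ⟨x, hx, hc⟩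
        · exact Or.inl (Or.inr (Or.inr h))
        · exact Or.inr ⟨x, hx, Or.inr (Or.inr hc)⟩
      have hlt : ¬ 2 ≤ worst := fun h => hhi (h2.mp h)
      rw [if_pos (by omega), if_pos hmo]
    · have hlt1 : ¬ 1 ≤ worst := by
        intro h
        rcases h1.mp h with (h' | h' | h') | ⟨x, hx, (h' | h' | h')⟩
        · exact hhi (Or.inl (Or.inl h'))
        · exact hhi (Or.inl (Or.inr h'))
        · exact hmo (Or.inl h')
        · exact hhi (Or.inr ⟨x, hx, Or.inl h'⟩)
        · exact hhi (Or.inr ⟨x, hx, Or.inr h'⟩)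
        · exact hmo (Or.inr ⟨x, hx, h'⟩)
      rw [if_neg (by omega), if_neg hmo]

theorem score_spec_aux (domains : List (String × String)) :
    score_robins_i_overall domains = score_robins_i_overall_alt domains := by
  unfold score_robins_i_overall score_robins_i_overall_alt
  set d := PySem.Dict.ofList domains with hd
  have hg : ∀ k, ROBINS_SEVERITY.getD (d.getD k "low") 0 = sevO (d.get? k) := by
    intro k; simp [sevO, PySem.Dict.getD]
  simp only [ROBINS_I_DOMAINS, List.map_cons, List.map_nil, hg, PySem.List.max?_id_cons,
    Option.getD_some]
  have := main_gen (d.get? "confounding")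
    [d.get? "selection_participants", d.get? "classification_interventions", d.get? "deviations",
     d.get? "missing_data", d.get? "measurement", d.get? "selection_reported_result"]
  simpa using this

-- ===== VERDICT (by name: the statement is the Claim_ definition above) =====
theorem score_robins_i_overall_spec : Claim_equal_score_robins_i_overall := by
  intro domains _
  exact score_spec_aux domains
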